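-- pv_equiv track=rewrite | github.com/jiyoungzero/codetree-TILs | 241031/LED 전구 버튼/led-bulb-button.py | toggle_lights
-- ===== SOURCE A (Python) =====
-- def toggle_lights(n, b, lights):
--     seen_states = {}
--     current_state = tuple(lights)
--
--     for step in range(b):
--         if current_state in seen_states:
--             # 주기를 발견
--             cycle_length = step - seen_states[current_state]
--             remaining_steps = b % cycle_length
--
--             for _ in range(remaining_steps):
--                 new_state = []
--                 for i in range(n):
--                     left_index = (i - 1) % n
--                     if current_state[left_index] == 1:
--                         new_state.append(1 - current_state[i])
--                     else:
--                         new_state.append(current_state[i])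
--                 current_state = tuple(new_state)
--             break
--         else:
--             seen_states[current_state] = step
--             new_state = []
--             for i in range(n):
--                 left_index = (i - 1) % n
--                 if current_state[left_index] == 1:
--                     new_state.append(1 - current_state[i])
--                 else:
--                     new_state.append(current_state[i])
--             current_state = tuple(new_state)
--
--     return list(current_state)
-- ===== SOURCE B (Python) =====
-- def toggle_lights(n, b, lights):
--     def step(state):
--         new_state = []
--         for i in range(n):
--             left_index = (i - 1) % n
--             if state[left_index] == 1:
--                 new_state.append(1 - state[i])
--             else:
--                 new_state.append(state[i])
--         return tuple(new_state)
--
--     history = []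
--     index_of = {}
--     current = tuple(lights)
--     for s in range(b):
--         if current in index_of:
--             s0 = index_of[current]
--             cycle_length = s - s0
--             # the recorded orbit already contains the answer: no re-simulation
--             return list(history[s0 + b % cycle_length])
--         index_of[current] = s
--         history.append(current)
--         current = step(current)
--     return list(current)
-- ===== Notes on version B (the rewrite author's own statement) =====
-- stated objective: alternative
-- what changed: B records every state in a history list alongside the seen-dict and, on detecting a repeat, returns history[s0 + b % cycle_length] by direct index lookup, eliminating A's second simulation loop that re-applies the transition b % cycle_length more times.
import Mathlib
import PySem

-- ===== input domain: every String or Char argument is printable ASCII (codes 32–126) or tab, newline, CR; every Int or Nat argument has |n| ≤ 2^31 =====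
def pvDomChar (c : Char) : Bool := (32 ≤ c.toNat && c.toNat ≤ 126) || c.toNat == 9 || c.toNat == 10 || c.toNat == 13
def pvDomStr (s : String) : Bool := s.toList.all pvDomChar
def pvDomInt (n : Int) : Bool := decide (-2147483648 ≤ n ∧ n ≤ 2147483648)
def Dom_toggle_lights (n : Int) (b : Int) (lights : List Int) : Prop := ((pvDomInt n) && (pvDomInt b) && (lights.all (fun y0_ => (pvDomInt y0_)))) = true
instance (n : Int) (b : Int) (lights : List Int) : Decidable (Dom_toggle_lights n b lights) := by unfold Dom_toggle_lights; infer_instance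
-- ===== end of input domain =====

-- B replaces A's post-detection re-simulation loop by an indexed lookup into a recorded
-- history of states (objective: alternative/simpler return path; same transition rule).

-- ===== PORT A =====
-- one transition: new_state = [1-cur[i] if cur[(i-1)%n]==1 else cur[i] for i in range(n)]
-- (A writes this inner loop twice; it is transliterated once and used twice; none = IndexError)
def pvStepA (n : Int) (cur : List Int) : Option (List Int) :=
  (PySem.List.pyRange 0 n 1).foldl
    (fun acc i =>
      match acc with
      | none => none
      | some ns =>
        match PySem.List.pyGet? cur (PySem.Int.mod (i - 1) n), PySem.List.pyGet? cur i with
        | some l, some c => some (ns ++ [if l == 1 then 1 - c else c])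
        | _, _ => none)
    (some [])

-- for _ in range(remaining_steps): current_state = <one transition>
def pvSimA (n : Int) (k : Nat) (cur : List Int) : Option (List Int) :=
  match k with
  | 0 => some cur
  | Nat.succ k' =>
    match pvStepA n cur with
    | none => none
    | some cur' => pvSimA n k' cur'

-- for step in range(b): … (fuel counts the remaining iterations; step is the loop index)
def pvLoopA (n b : Int) (fuel : Nat) (step : Int)
    (seen : PySem.Dict (List Int) Int) (cur : Option (List Int)) : Option (List Int) :=
  match cur with
  | none => none
  | some c =>
    match fuel with
    | 0 => some c
    | Nat.succ f =>
      match PySem.Dict.get? seen c with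
      | some s0 =>
        let cycle_length := step - s0
        pvSimA n (PySem.Int.mod b cycle_length).toNat c
      | none => pvLoopA n b f (step + 1) (PySem.Dict.insert seen c step) (pvStepA n c)

def toggle_lights (n : Int) (b : Int) (lights : List Int) : List Int :=
  (pvLoopA n b b.toNat 0 PySem.Dict.empty (some lights)).getD []

-- ===== PORT B =====
-- B's helper step(state) (same transition rule, copied exactly; none = IndexError)
def pvStepB (n : Int) (state : List Int) : Option (List Int) :=
  (PySem.List.pyRange 0 n 1).foldl
    (fun acc i =>
      match acc with
      | none => none
      | some ns =>
        match PySem.List.pyGet? state (PySem.Int.mod (i - 1) n), PySem.List.pyGet? state i with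
        | some l, some c => some (ns ++ [if l == 1 then 1 - c else c])
        | _, _ => none)
    (some [])

-- for s in range(b): on a repeat return history[s0 + b % cycle_length], else record and step
def pvLoopB (n b : Int) (fuel : Nat) (s : Int)
    (indexOf : PySem.Dict (List Int) Int) (history : List (List Int)) (cur : List Int) :
    Option (List Int) :=
  match fuel with
  | 0 => some cur
  | Nat.succ f =>
    match PySem.Dict.get? indexOf cur with
    | some s0 =>
      let cycle_length := s - s0
      PySem.List.pyGet? history (s0 + PySem.Int.mod b cycle_length)
    | none =>
      match pvStepB n cur with
      | none => none
      | some cur' => pvLoopB n b f (s + 1) (PySem.Dict.insert indexOf cur s) (history ++ [cur]) cur'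

def toggle_lights_alt (n : Int) (b : Int) (lights : List Int) : List Int :=
  (pvLoopB n b b.toNat 0 PySem.Dict.empty [] lights).getD []

-- ===== PRECONDITION & SPEC =====
-- Pre_ excludes exactly the IndexError inputs: b ≥ 1 and 1 ≤ n with fewer than n lights.
def Pre_toggle_lights (n : Int) (b : Int) (lights : List Int) : Prop :=
  b ≤ 0 ∨ n ≤ 0 ∨ n ≤ (lights.length : Int)
instance (n : Int) (b : Int) (lights : List Int) : Decidable (Pre_toggle_lights n b lights) := by
  unfold Pre_toggle_lights; infer_instance

def pvWitness_toggle_lights : Int × Int × List Int := (3, 7, [1, 0, 0])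

def Spec_toggle_lights (n : Int) (b : Int) (lights : List Int) (out : List Int) : Prop :=
  out = toggle_lights_alt n b lights
instance (n : Int) (b : Int) (lights : List Int) (out : List Int) :
    Decidable (Spec_toggle_lights n b lights out) := by unfold Spec_toggle_lights; infer_instance

-- ===== CLAIM (what is proved, stated in full; the proofs are below) =====
def Claim_equal_toggle_lights : Prop :=
  ∀ (n : Int) (b : Int) (lights : List Int), Dom_toggle_lights n b lights →
    Pre_toggle_lights n b lights → Spec_toggle_lights n b lights (toggle_lights n b lights)

-- ===== LEMMAS AND PROOFS =====

theorem pvStepB_eq_pvStepA (n : Int) (c : List Int) : pvStepB n c = pvStepA n c := rfl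

-- the orbit recorded so far, with the current state appended, is a pvStepA-chain
def pvChain (n : Int) (H : List (List Int)) : Prop :=
  ∀ j (h : j + 1 < H.length), pvStepA n (H[j]'(by omega)) = some (H[j + 1]'h)

theorem pvSimA_chain (n : Int) (H : List (List Int)) (hch : pvChain n H) :
    ∀ (k j : Nat) (h1 : j + k < H.length),
      pvSimA n k (H[j]'(by omega)) = some (H[j + k]'h1) := by
  intro k
  induction k with
  | zero => intro j h1; simp [pvSimA]
  | succ k ih =>
    intro j h1
    have hj1 : j + 1 < H.length := by omega
    have hstep := hch j hj1
    have hrec := ih (j + 1) (by omega)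
    simp only [pvSimA, hstep, hrec]
    exact congrArg some (getElem_congr rfl (by omega) (by omega))

theorem pvLoop_eq (n b : Int) :
    ∀ (fuel : Nat) (seen : PySem.Dict (List Int) Int) (hist : List (List Int)) (cur : List Int),
      pvChain n (hist ++ [cur]) →
      (∀ y s0, PySem.Dict.get? seen y = some s0 →
        ∃ j : Nat, ∃ h : j < hist.length, (j : Int) = s0 ∧ hist[j]'h = y) →
      pvLoopA n b fuel (hist.length : Int) seen (some cur)
        = pvLoopB n b fuel (hist.length : Int) seen hist cur := by
  intro fuel
  induction fuel with
  | zero => intro seen hist cur _ _; rfl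
  | succ f ih =>
    intro seen hist cur hch hdict
    rw [pvLoopA, pvLoopB]
    cases hget : PySem.Dict.get? seen cur with
    | some s0 =>
      simp only
      obtain ⟨j, hj, hjs0, hjy⟩ := hdict cur s0 hget
      have hL : (0:Int) < (hist.length : Int) - s0 := by omega
      set r := PySem.Int.mod b ((hist.length : Int) - s0) with hr
      have hr0 : 0 ≤ r := PySem.Int.mod_nonneg b hL
      have hrlt : r < (hist.length : Int) - s0 := PySem.Int.mod_lt b hL
      have hidx : j + r.toNat < hist.length := by omega
      have hidxH : j + r.toNat < (hist ++ [cur]).length := by simp; omega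
      have hjH : j < (hist ++ [cur]).length := by simp; omega
      have hcurH : (hist ++ [cur])[j]'hjH = cur := by
        rw [List.getElem_append_left hj]; exact hjy
      have hsim : pvSimA n r.toNat cur = some ((hist ++ [cur])[j + r.toNat]'hidxH) := by
        conv_lhs => rw [← hcurH]
        exact pvSimA_chain n (hist ++ [cur]) hch r.toNat j hidxH
      have hgetH : PySem.List.pyGet? hist (s0 + r)
          = some ((hist ++ [cur])[j + r.toNat]'hidxH) := by
        have hcast : s0 + r = ((j + r.toNat : Nat) : Int) := by push_cast; omega
        rw [hcast, PySem.List.pyGet?_natCast, List.getElem?_eq_getElem hidx]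
        exact congrArg some (List.getElem_append_left hidx).symm
      rw [hsim, hgetH]
    | none =>
      simp only
      cases hstep : pvStepA n cur with
      | none =>
        rw [pvStepB_eq_pvStepA, hstep]
        simp [pvLoopA]
      | some cur' =>
        rw [pvStepB_eq_pvStepA, hstep]
        simp only
        have hch' : pvChain n ((hist ++ [cur]) ++ [cur']) := by
          intro j h
          by_cases hj2 : j + 1 < (hist ++ [cur]).length
          · have hj0 : j < (hist ++ [cur]).length := by omega
            rw [List.getElem_append_left hj0, List.getElem_append_left hj2]
            exact hch j hj2
          · have hjeq : j = hist.length := by simp at hj2 h ⊢; omega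
            subst hjeq
            have hlt : hist.length < (hist ++ [cur]).length := by simp
            have h1 : ((hist ++ [cur]) ++ [cur'])[hist.length]'(by simp) = cur := by
              rw [List.getElem_append_left hlt, List.getElem_append_right (by omega)]
              simp
            have h2 : ((hist ++ [cur]) ++ [cur'])[hist.length + 1]'h = cur' := by
              rw [List.getElem_append_right (by simp)]
              simp
            rw [h1, h2, hstep]
        have hdict' : ∀ y s0,
            PySem.Dict.get? (PySem.Dict.insert seen cur (hist.length : Int)) y = some s0 →
            ∃ j : Nat, ∃ h : j < (hist ++ [cur]).length, (j : Int) = s0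
              ∧ (hist ++ [cur])[j]'h = y := by
          intro y s0 hy
          by_cases hyc : y = cur
          · subst hyc
            rw [PySem.Dict.get?_insert_self] at hy
            refine ⟨hist.length, by simp, (Option.some.inj hy), ?_⟩
            rw [List.getElem_append_right (by omega)]
            simp
          · rw [PySem.Dict.get?_insert_of_ne _ _ hyc] at hy
            obtain ⟨j, hj, hjs0, hjy⟩ := hdict y s0 hy
            refine ⟨j, by simp; omega, hjs0, ?_⟩
            rw [List.getElem_append_left hj]
            exact hjy
        have := ih (PySem.Dict.insert seen cur (hist.length : Int)) (hist ++ [cur]) cur'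
          hch' hdict'
        have hlen' : ((hist ++ [cur]).length : Int) = (hist.length : Int) + 1 := by simp
        rw [hlen'] at this
        exact this

theorem pv_init_chain (n : Int) (x : List Int) : pvChain n [x] := by
  intro j h
  simp at h

-- ===== VERDICT (by name: the statement is the Claim_ definition above) =====
theorem toggle_lights_spec : Claim_equal_toggle_lights := by
  intro n b lights _ _
  unfold Spec_toggle_lights toggle_lights toggle_lights_alt
  have := pvLoop_eq n b b.toNat PySem.Dict.empty [] lights
    (pv_init_chain n lights)
    (by intro y s0 h; simp [PySem.Dict.get?_empty] at h)
  norm_num at this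
  rw [this]
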